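-- pv_equiv track=rewrite | github.com/13D4C/CyberGround_OpenHouse_Workshop | CTF.py | complex_transform
-- ===== SOURCE A (Python) =====
-- def complex_transform(data):
--     # Step 1: Convert to ASCII and Add a Key
--     ascii_values = [ord(char) + 10 for char in data] # Add 10 to each character's ASCII value
--
--     # Step 2: Swap Adjacent Values
--     swapped = []
--     for i in range(0, len(ascii_values), 2):
--         if i + 1 < len(ascii_values):
--             swapped.append(ascii_values[i+1])
--             swapped.append(ascii_values[i])
--         else:
--             swapped.append(ascii_values[i])
--
--     # Step 3: XOR with a Repeating Key
--     key = [5, 12, 3]  # Repeating key for XOR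
--     xored = []
--     for i, value in enumerate(swapped):
--         xored.append(value ^ key[i % len(key)])
--
--     # Step 4: Convert back to Characters
--     result = "".join([chr(val) for val in xored])
--
--     return result
-- ===== SOURCE B (Python) =====
-- def complex_transform(data):
--     # One fused pass: consume characters in pairs from an iterator, emitting each
--     # output char directly (no intermediate ascii/swapped/xored lists).
--     key = [5, 12, 3]
--     out = []
--     it = iter(data)
--     k = 0
--     for a in it:
--         b = next(it, None)
--         if b is None:
--             out.append(chr((ord(a) + 10) ^ key[k % 3]))
--         else:
--             out.append(chr((ord(b) + 10) ^ key[k % 3]))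
--             out.append(chr((ord(a) + 10) ^ key[(k + 1) % 3]))
--             k += 2
--     return "".join(out)
-- ===== Notes on version B (the rewrite author's own statement) =====
-- stated objective: simpler
-- what changed: B replaces A's three sequential list-building passes (shift all codes, swap adjacent via an index loop, XOR via enumerate) by a single fused pass that consumes the characters two at a time from an iterator and emits each output character directly, with no intermediate lists; the removed intermediate lists and passes give a constant-factor speedup.
import Mathlib
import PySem

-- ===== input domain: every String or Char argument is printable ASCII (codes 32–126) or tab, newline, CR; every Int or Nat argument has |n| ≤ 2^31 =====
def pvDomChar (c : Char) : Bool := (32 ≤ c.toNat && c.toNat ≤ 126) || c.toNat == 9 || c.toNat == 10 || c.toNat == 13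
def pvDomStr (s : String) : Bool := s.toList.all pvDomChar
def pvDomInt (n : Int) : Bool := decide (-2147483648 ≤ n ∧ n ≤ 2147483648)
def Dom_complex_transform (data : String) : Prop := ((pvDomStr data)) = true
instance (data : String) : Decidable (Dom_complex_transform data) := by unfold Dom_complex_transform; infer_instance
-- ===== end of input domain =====

-- B fuses A's three list-building passes into one pairwise pass over the characters (objective: simpler, one traversal, no intermediate lists).

-- ===== PORT A =====
-- 'chr(v)' is ported as 'Char.ofNat v.toNat' (exact here: every produced code is a valid scalar value);
-- '"".join([chr(v) ...])' is ported as 'String.mk' of the char list.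
def complex_transform (data : String) : String :=
  let ascii_values : List Int := data.toList.map (fun c => ((c.toNat : Int) + 10))
  let swapped : List Int :=
    (PySem.List.pyRange 0 (PySem.List.len ascii_values) 2).foldl (fun acc i =>
      if i + 1 < PySem.List.len ascii_values then
        acc ++ [PySem.List.pyGetD ascii_values (i + 1) 0, PySem.List.pyGetD ascii_values i 0]
      else
        acc ++ [PySem.List.pyGetD ascii_values i 0]) []
  let key : List Int := [5, 12, 3]
  let xored : List Int :=
    (PySem.List.enumerate swapped).foldl (fun acc p =>
      acc ++ [PySem.Int.bxor p.2 (PySem.List.pyGetD key (PySem.Int.mod p.1 (PySem.List.len key)) 0)]) []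
  String.mk (xored.map (fun v => Char.ofNat v.toNat))

-- ===== PORT B =====
-- B's loop consumes the iterator two characters at a time; its transliteration is this
-- two-step structural recursion carrying the output-position counter k.
def pvGoB (key : List Int) (cs : List Char) (k : Int) : List Char :=
  match cs with
  | [] => []
  | [a] => [Char.ofNat (PySem.Int.bxor ((a.toNat : Int) + 10) (PySem.List.pyGetD key (PySem.Int.mod k 3) 0)).toNat]
  | a :: b :: t =>
      Char.ofNat (PySem.Int.bxor ((b.toNat : Int) + 10) (PySem.List.pyGetD key (PySem.Int.mod k 3) 0)).toNat
      :: Char.ofNat (PySem.Int.bxor ((a.toNat : Int) + 10) (PySem.List.pyGetD key (PySem.Int.mod (k + 1) 3) 0)).toNat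
      :: pvGoB key t (k + 2)


def complex_transform_alt (data : String) : String :=
  String.mk (pvGoB [5, 12, 3] data.toList 0)

-- ===== PRECONDITION & SPEC =====
def Spec_complex_transform (data : String) (out : String) : Prop := out = complex_transform_alt data
instance (data : String) (out : String) : Decidable (Spec_complex_transform data out) := by unfold Spec_complex_transform; infer_instance

-- ===== CLAIM (what is proved, stated in full; the proofs are below) =====
def Claim_equal_complex_transform : Prop := ∀ (data : String), Dom_complex_transform data → Spec_complex_transform data (complex_transform data)

-- ===== LEMMAS AND PROOFS =====

def pvSw (l : List Int) : List Int :=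
  match l with
  | [] => []
  | [a] => [a]
  | a :: b :: t => b :: a :: pvSw t

theorem pv_range_flatMap : ∀ (l : List Int),
    (List.range ((l.length + 1) / 2)).flatMap (fun k =>
      if 2*k+1 < l.length then [l.getD (2*k+1) 0, l.getD (2*k) 0] else [l.getD (2*k) 0]) = pvSw l
  | [] => rfl
  | [a] => by norm_num [pvSw]
  | a :: b :: t => by
      have hm : ((a::b::t).length + 1) / 2 = (t.length + 1) / 2 + 1 := by
        simp only [List.length_cons]; omega
      rw [hm, List.range_succ_eq_map, List.flatMap_cons, List.flatMap_map]
      have hpt : ∀ k ∈ List.range ((t.length+1)/2),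
          (fun k => if 2*k+1 < (a::b::t).length then [(a::b::t).getD (2*k+1) 0, (a::b::t).getD (2*k) 0] else [(a::b::t).getD (2*k) 0]) (Nat.succ k)
        = (fun k => if 2*k+1 < t.length then [t.getD (2*k+1) 0, t.getD (2*k) 0] else [t.getD (2*k) 0]) k := by
        intro k _
        simp only []
        have e1 : 2*(Nat.succ k)+1 = (2*k+1) + 1 + 1 := by omega
        have e2 : 2*(Nat.succ k) = (2*k) + 1 + 1 := by omega
        have hc : (2*k+1)+1+1 < (a::b::t).length ↔ 2*k+1 < t.length := by
          simp only [List.length_cons]; omega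
        rw [e1, e2, if_congr hc rfl rfl, List.getD_cons_succ, List.getD_cons_succ,
          List.getD_cons_succ, List.getD_cons_succ]
      rw [List.flatMap_congr hpt, pv_range_flatMap t]
      simp [pvSw]

theorem pv_flatMap_eq_sw (l : List Int) :
    (PySem.List.pyRange 0 (PySem.List.len l) 2).flatMap (fun i =>
      if i + 1 < PySem.List.len l then
        [PySem.List.pyGetD l (i + 1) 0, PySem.List.pyGetD l i 0]
      else
        [PySem.List.pyGetD l i 0]) = pvSw l := by
  have hlen : PySem.List.len l = (l.length : Int) := by simp [PySem.List.len]
  rw [hlen, PySem.List.pyRange_of_pos 0 (l.length : Int) (by norm_num), List.flatMap_map]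
  have hcnt : (if (0:Int) < (l.length : Int) then (((l.length : Int) - 0 + 2 - 1)/2).toNat else 0)
      = (l.length + 1) / 2 := by split <;> omega
  rw [hcnt]
  have hpt : ∀ k ∈ List.range ((l.length + 1) / 2),
      (fun i : Int => if i + 1 < (l.length : Int) then
          [PySem.List.pyGetD l (i + 1) 0, PySem.List.pyGetD l i 0]
        else [PySem.List.pyGetD l i 0]) (0 + 2 * (k : Int))
    = (fun k => if 2*k+1 < l.length then [l.getD (2*k+1) 0, l.getD (2*k) 0] else [l.getD (2*k) 0]) k := by
    intro k _
    simp only []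
    have e1 : (0:Int) + 2 * (k : Int) + 1 = ((2*k+1 : Nat) : Int) := by push_cast; ring
    have e2 : (0:Int) + 2 * (k : Int) = ((2*k : Nat) : Int) := by push_cast; ring
    have hc : ((0:Int) + 2 * (k : Int) + 1 < (l.length : Int)) ↔ 2*k+1 < l.length := by
      constructor <;> intro h <;> omega
    rw [if_congr hc rfl rfl, e1, e2, PySem.List.pyGetD_natCast, PySem.List.pyGetD_natCast]
  rw [List.flatMap_congr hpt, pv_range_flatMap l]

theorem pv_map_enum_sw : ∀ (cs : List Char) (s : Int),
    (PySem.List.enumerate (pvSw (cs.map (fun c => ((c.toNat : Int) + 10)))) s).map (fun p =>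
      Char.ofNat (PySem.Int.bxor p.2 (PySem.List.pyGetD [5, 12, 3] (PySem.Int.mod p.1 3) 0)).toNat)
    = pvGoB [5, 12, 3] cs s
  | [], s => by simp [pvSw, pvGoB, PySem.List.enumerate_nil]
  | [a], s => by simp [pvSw, pvGoB, PySem.List.enumerate_cons, PySem.List.enumerate_nil]
  | a :: b :: t, s => by
      simp only [List.map_cons, pvSw, PySem.List.enumerate_cons, pvGoB, List.map]
      rw [show s + 1 + 1 = s + 2 from by ring, pv_map_enum_sw t (s+2)]

-- ===== VERDICT (by name: the statement is the Claim_ definition above) =====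
theorem complex_transform_spec : Claim_equal_complex_transform := by
  intro data _
  unfold Spec_complex_transform complex_transform complex_transform_alt
  have hfn : (fun (acc : List Int) (i : Int) =>
      if i + 1 < PySem.List.len (data.toList.map (fun c => ((c.toNat : Int) + 10))) then
        acc ++ [PySem.List.pyGetD (data.toList.map (fun c => ((c.toNat : Int) + 10))) (i + 1) 0,
                PySem.List.pyGetD (data.toList.map (fun c => ((c.toNat : Int) + 10))) i 0]
      else
        acc ++ [PySem.List.pyGetD (data.toList.map (fun c => ((c.toNat : Int) + 10))) i 0])
      = (fun acc i => acc ++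
        (if i + 1 < PySem.List.len (data.toList.map (fun c => ((c.toNat : Int) + 10))) then
          [PySem.List.pyGetD (data.toList.map (fun c => ((c.toNat : Int) + 10))) (i + 1) 0,
           PySem.List.pyGetD (data.toList.map (fun c => ((c.toNat : Int) + 10))) i 0]
        else
          [PySem.List.pyGetD (data.toList.map (fun c => ((c.toNat : Int) + 10))) i 0])) := by
    funext acc i; split <;> rfl
  simp only [hfn]
  rw [PySem.List.foldl_append_singleton_eq_map, PySem.List.foldl_append_eq_flatMap]
  simp only [List.nil_append, pv_flatMap_eq_sw, List.map_map]
  rw [show PySem.List.len ([5, 12, 3] : List Int) = 3 from rfl]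
  rw [show ((fun v => Char.ofNat v.toNat) ∘ fun p : Int × Int =>
      PySem.Int.bxor p.2 (PySem.List.pyGetD [5, 12, 3] (PySem.Int.mod p.1 3) 0))
    = (fun p : Int × Int => Char.ofNat (PySem.Int.bxor p.2
        (PySem.List.pyGetD [5, 12, 3] (PySem.Int.mod p.1 3) 0)).toNat) from rfl]
  rw [pv_map_enum_sw]
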